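-- pv_equiv track=rewrite | github.com/maiconloure/PythonPrograms | SALSA.py | descriptor
-- ===== SOURCE A (Python) =====
-- def descriptor(string, salsa):
--     """Vai remover salsa."""
--
--     criptada = list(string)
--     palavra = []
--
--     for v, i in enumerate(criptada):
--         if i in salsa[:1]:
--             salsa = salsa[1:]
--         else:
--             palavra.append(i)
--
--     return ''.join(palavra)
-- ===== SOURCE B (Python) =====
-- def descriptor(string, salsa):
--     """Vai remover salsa."""
--     out = []
--     rest = string
--     for s in salsa:
--         j = rest.find(s)
--         if j < 0:
--             break
--         out.append(rest[:j])
--         rest = rest[j + 1:]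
--     out.append(rest)
--     return ''.join(out)
-- ===== Notes on version B (the rewrite author's own statement) =====
-- stated objective: alternative
-- what changed: B drives the loop by salsa instead of by the string: for each salsa char it jumps to the first occurrence with str.find and keeps the slice before it, instead of A's char-by-char scan that compares each string char against the current salsa head.
import Mathlib
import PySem

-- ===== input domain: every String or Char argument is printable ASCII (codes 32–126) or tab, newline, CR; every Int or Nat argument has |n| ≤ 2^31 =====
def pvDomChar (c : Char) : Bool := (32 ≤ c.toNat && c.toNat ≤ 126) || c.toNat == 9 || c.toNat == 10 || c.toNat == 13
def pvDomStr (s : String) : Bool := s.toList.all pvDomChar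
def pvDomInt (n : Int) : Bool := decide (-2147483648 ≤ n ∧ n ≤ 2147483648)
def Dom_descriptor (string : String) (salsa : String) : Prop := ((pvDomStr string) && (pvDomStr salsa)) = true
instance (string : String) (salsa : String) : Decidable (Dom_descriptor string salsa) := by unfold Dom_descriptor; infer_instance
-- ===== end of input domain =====

-- B replaces A's char-by-char scan of the string with a salsa-driven loop that
-- jumps to each salsa char's first occurrence via find and keeps slices (alternative decomposition).
set_option maxRecDepth 4096


-- ===== PORT A =====
-- A loops over the chars of `string` (enumerate index v is unused); `i in salsa[:1]`
-- tests the char against salsa's first char (False when salsa is empty);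
-- on a match salsa loses its head, otherwise the char is appended to palavra.
def descriptorGoA (criptada : List Char) (salsa : List Char) (palavra : List Char) : List Char :=
  match criptada with
  | [] => palavra
  | i :: rest =>
    match salsa with
    | [] => descriptorGoA rest [] (palavra ++ [i])
    | s :: st =>
      if i = s then descriptorGoA rest st palavra
      else descriptorGoA rest (s :: st) (palavra ++ [i])

def descriptor (string : String) (salsa : String) : String :=
  String.ofList (descriptorGoA string.toList salsa.toList [])

-- ===== PORT B =====
-- B loops over salsa; rest.find(s) is `List.findIdx? (· = s)` (none = -1 = break).
def descriptorGoB (salsa : List Char) (rest : List Char) (out : List Char) : List Char :=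
  match salsa with
  | [] => out ++ rest
  | s :: ss =>
    match rest.findIdx? (· = s) with
    | none => out ++ rest
    | some j => descriptorGoB ss (rest.drop (j + 1)) (out ++ rest.take j)

def descriptor_alt (string : String) (salsa : String) : String :=
  String.ofList (descriptorGoB salsa.toList string.toList [])

-- ===== PRECONDITION & SPEC =====
def Spec_descriptor (string : String) (salsa : String) (out : String) : Prop := out = descriptor_alt string salsa
instance (string : String) (salsa : String) (out : String) : Decidable (Spec_descriptor string salsa out) := by unfold Spec_descriptor; infer_instance

-- ===== CLAIM (what is proved, stated in full; the proofs are below) =====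
def Claim_equal_descriptor : Prop := ∀ (string : String) (salsa : String), Dom_descriptor string salsa → Spec_descriptor string salsa (descriptor string salsa)

-- ===== LEMMAS AND PROOFS =====

-- accumulator-free form of A's loop
def Af : List Char → List Char → List Char
  | [], _ => []
  | i :: cs, [] => i :: Af cs []
  | i :: cs, s :: ss => if i = s then Af cs ss else i :: Af cs (s :: ss)

theorem Af_nil_salsa (cs : List Char) : Af cs [] = cs := by
  induction cs with
  | nil => rfl
  | cons i cs ih => simp [Af, ih]

theorem goA_eq (cs : List Char) : ∀ (ss acc : List Char),
    descriptorGoA cs ss acc = acc ++ Af cs ss := by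
  induction cs with
  | nil => intro ss acc; simp [descriptorGoA, Af]
  | cons i cs ih =>
    intro ss acc
    cases ss with
    | nil => simp [descriptorGoA, Af, ih]
    | cons s st =>
      by_cases h : i = s <;> simp [descriptorGoA, Af, h, ih]

theorem Af_find (s : Char) : ∀ (cs ss : List Char),
    (match cs.findIdx? (· = s) with
     | none => cs
     | some j => cs.take j ++ Af (cs.drop (j + 1)) ss) = Af cs (s :: ss) := by
  intro cs
  induction cs with
  | nil => intro ss; simp [Af]
  | cons i cs ih =>
    intro ss
    by_cases h : i = s
    · simp [List.findIdx?_cons, h, Af]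
    · have := ih ss
      cases hf : cs.findIdx? (· = s) with
      | none =>
        simp only [hf] at this
        simp [List.findIdx?_cons, h, hf, Af, ← this]
      | some j =>
        simp only [hf] at this
        simp [List.findIdx?_cons, h, hf, Af, ← this]

theorem goB_eq : ∀ (ss cs acc : List Char),
    descriptorGoB ss cs acc = acc ++ Af cs ss := by
  intro ss
  induction ss with
  | nil => intro cs acc; simp [descriptorGoB, Af_nil_salsa]
  | cons s ss ih =>
    intro cs acc
    have key := Af_find s cs ss
    cases hf : cs.findIdx? (· = s) with
    | none =>
      simp only [hf] at key
      simp [descriptorGoB, hf, ← key]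
    | some j =>
      simp only [hf] at key
      simp [descriptorGoB, hf, ih, ← key]

-- ===== VERDICT (by name: the statement is the Claim_ definition above) =====
theorem descriptor_spec : Claim_equal_descriptor := by
  intro string salsa _
  unfold Spec_descriptor descriptor descriptor_alt
  rw [goA_eq, goB_eq]
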